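-- pv_equiv track=rewrite | github.com/liviafdias/Placas | Placas.py | verificaCeara
-- ===== SOURCE A (Python) =====
-- def verificaCeara(placa):
--     prefixo = placa[:3]
--
--     intervalos = [
--         ('HTX', 'HZA'),
--         ('NQL', 'NRE'),
--         ('NUM', 'NVF'),
--         ('OCB', 'OCU'),
--         ('OHX', 'OIQ'),
--         ('ORN', 'OSV'),
--         ('OZA', 'OZA'),
--         ('PMA', 'POZ'),
--         ('RIA', 'RIN'),
--         ('SAN', 'SBV')
--     ]
--
--     for inicio, fim in intervalos:
--         if inicio <= prefixo <= fim:
--             return True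
--
--     return False
-- ===== SOURCE B (Python) =====
-- _STARTS = ['HTX', 'NQL', 'NUM', 'OCB', 'OHX', 'ORN', 'OZA', 'PMA', 'RIA', 'SAN']
-- _ENDS   = ['HZA', 'NRE', 'NVF', 'OCU', 'OIQ', 'OSV', 'OZA', 'POZ', 'RIN', 'SBV']
--
--
-- def verificaCeara(placa):
--     prefixo = placa[:3]
--     # binary search: index of the last interval start <= prefixo
--     lo, hi = 0, 10
--     while lo < hi:
--         mid = (lo + hi) // 2
--         if _STARTS[mid] <= prefixo:
--             lo = mid + 1
--         else:
--             hi = mid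
--     i = lo - 1
--     return i >= 0 and prefixo <= _ENDS[i]
-- ===== Notes on version B (the rewrite author's own statement) =====
-- stated objective: alternative
-- what changed: Replaces A's linear scan over the 10 sorted disjoint (start,end) prefix intervals by a hand-written binary search over the interval starts for the last start <= prefix, followed by a single end-bound check.
import Mathlib
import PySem

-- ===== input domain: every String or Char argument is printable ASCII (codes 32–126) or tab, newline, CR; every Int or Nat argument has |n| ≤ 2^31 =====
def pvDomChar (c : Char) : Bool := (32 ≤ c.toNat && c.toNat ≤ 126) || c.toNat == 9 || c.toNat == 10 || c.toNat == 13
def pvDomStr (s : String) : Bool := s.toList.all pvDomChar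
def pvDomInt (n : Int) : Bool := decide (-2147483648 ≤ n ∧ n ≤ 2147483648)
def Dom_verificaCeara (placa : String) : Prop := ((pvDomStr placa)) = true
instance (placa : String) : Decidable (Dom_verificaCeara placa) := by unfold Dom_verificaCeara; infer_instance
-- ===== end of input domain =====

-- B replaces A's linear scan of the 10 (sorted, disjoint) prefix intervals by a binary search
-- for the last interval start ≤ prefix, then a single end-bound check (objective: alternative).

-- ===== PORT A =====
-- the interval table A builds on every call
def pvIntervalos : List (String × String) :=
  [("HTX", "HZA"), ("NQL", "NRE"), ("NUM", "NVF"), ("OCB", "OCU"), ("OHX", "OIQ"),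
   ("ORN", "OSV"), ("OZA", "OZA"), ("PMA", "POZ"), ("RIA", "RIN"), ("SAN", "SBV")]

-- the 'for inicio, fim in intervalos: if inicio <= prefixo <= fim: return True' loop
def pvLoopA (prefixo : String) : List (String × String) → Bool
  | [] => false
  | (inicio, fim) :: rest =>
      if inicio ≤ prefixo ∧ prefixo ≤ fim then true else pvLoopA prefixo rest

def verificaCeara (placa : String) : Bool :=
  pvLoopA (PySem.Str.slice placa none (some 3)) pvIntervalos

-- ===== PORT B =====
def pvStarts : List String := ["HTX", "NQL", "NUM", "OCB", "OHX", "ORN", "OZA", "PMA", "RIA", "SAN"]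
def pvEnds : List String := ["HZA", "NRE", "NVF", "OCU", "OIQ", "OSV", "OZA", "POZ", "RIN", "SBV"]

-- Source B's 'while lo < hi' binary-search loop, as the obvious tail recursion on (lo, hi)
def pvBSearch (p : String) (lo hi : Int) : Int :=
  if lo < hi then
    let mid := PySem.Int.floordiv (lo + hi) 2
    if PySem.List.pyGetD pvStarts mid "" ≤ p then pvBSearch p (mid + 1) hi
    else pvBSearch p lo mid
  else lo
termination_by (hi - lo).toNat
decreasing_by
  all_goals (rw [PySem.Int.floordiv_eq_ediv_of_pos (by norm_num)] at *; omega)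

-- 'i = lo - 1; return i >= 0 and prefixo <= _ENDS[i]' (the && short-circuits exactly like 'and')
def pvAltCore (prefixo : String) : Bool :=
  let lo := pvBSearch prefixo 0 10
  let i := lo - 1
  decide (0 ≤ i) && decide (prefixo ≤ PySem.List.pyGetD pvEnds i "")

def verificaCeara_alt (placa : String) : Bool :=
  pvAltCore (PySem.Str.slice placa none (some 3))

-- ===== PRECONDITION & SPEC =====
def Spec_verificaCeara (placa : String) (out : Bool) : Prop := out = verificaCeara_alt placa
instance (placa : String) (out : Bool) : Decidable (Spec_verificaCeara placa out) := by unfold Spec_verificaCeara; infer_instance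

-- ===== CLAIM (what is proved, stated in full; the proofs are below) =====
def Claim_equal_verificaCeara : Prop := ∀ (placa : String), Dom_verificaCeara placa → Spec_verificaCeara placa (verificaCeara placa)

-- ===== LEMMAS AND PROOFS =====

-- one unfolding step / base case of the binary-search loop
theorem pvB_step (p : String) (lo hi : Int) (h : lo < hi) :
    pvBSearch p lo hi = if PySem.List.pyGetD pvStarts (PySem.Int.floordiv (lo + hi) 2) "" ≤ p
      then pvBSearch p (PySem.Int.floordiv (lo + hi) 2 + 1) hi
      else pvBSearch p lo (PySem.Int.floordiv (lo + hi) 2) := by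
  rw [pvBSearch]; simp [h]

theorem pvB_base (p : String) (lo : Int) : pvBSearch p lo lo = lo := by
  rw [pvBSearch]; simp

-- one lemma per possible landing position of the binary search: scan = search there
theorem pvLeaf0 (p : String) (N0 : ¬ "HTX" ≤ p) :
    pvLoopA p pvIntervalos = pvAltCore p := by
  have N1 : ¬ "NQL" ≤ p := fun hc => N0 (le_trans (String.le_iff_toList_le.mpr (by decide)) hc)
  have N2 : ¬ "NUM" ≤ p := fun hc => N0 (le_trans (String.le_iff_toList_le.mpr (by decide)) hc)
  have N3 : ¬ "OCB" ≤ p := fun hc => N0 (le_trans (String.le_iff_toList_le.mpr (by decide)) hc)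
  have N4 : ¬ "OHX" ≤ p := fun hc => N0 (le_trans (String.le_iff_toList_le.mpr (by decide)) hc)
  have N5 : ¬ "ORN" ≤ p := fun hc => N0 (le_trans (String.le_iff_toList_le.mpr (by decide)) hc)
  have N6 : ¬ "OZA" ≤ p := fun hc => N0 (le_trans (String.le_iff_toList_le.mpr (by decide)) hc)
  have N7 : ¬ "PMA" ≤ p := fun hc => N0 (le_trans (String.le_iff_toList_le.mpr (by decide)) hc)
  have N8 : ¬ "RIA" ≤ p := fun hc => N0 (le_trans (String.le_iff_toList_le.mpr (by decide)) hc)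
  have N9 : ¬ "SAN" ≤ p := fun hc => N0 (le_trans (String.le_iff_toList_le.mpr (by decide)) hc)
  have hB : pvBSearch p 0 10 = 0 := by
    rw [pvB_step p 0 10 (by norm_num), show PySem.Int.floordiv (0 + 10) 2 = 5 from rfl, show PySem.List.pyGetD pvStarts 5 "" = "ORN" from rfl]
    rw [if_neg N5]
    rw [pvB_step p 0 5 (by norm_num), show PySem.Int.floordiv (0 + 5) 2 = 2 from rfl, show PySem.List.pyGetD pvStarts 2 "" = "NUM" from rfl]
    rw [if_neg N2]
    rw [pvB_step p 0 2 (by norm_num), show PySem.Int.floordiv (0 + 2) 2 = 1 from rfl, show PySem.List.pyGetD pvStarts 1 "" = "NQL" from rfl]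
    rw [if_neg N1]
    rw [pvB_step p 0 1 (by norm_num), show PySem.Int.floordiv (0 + 1) 2 = 0 from rfl, show PySem.List.pyGetD pvStarts 0 "" = "HTX" from rfl]
    rw [if_neg N0]
    exact pvB_base p 0
  simp [pvLoopA, pvIntervalos, pvAltCore, hB, N0, N1, N2, N3, N4, N5, N6, N7, N8, N9]

theorem pvLeaf1 (p : String) (P0 : "HTX" ≤ p) (N1 : ¬ "NQL" ≤ p) :
    pvLoopA p pvIntervalos = pvAltCore p := by
  have N2 : ¬ "NUM" ≤ p := fun hc => N1 (le_trans (String.le_iff_toList_le.mpr (by decide)) hc)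
  have N3 : ¬ "OCB" ≤ p := fun hc => N1 (le_trans (String.le_iff_toList_le.mpr (by decide)) hc)
  have N4 : ¬ "OHX" ≤ p := fun hc => N1 (le_trans (String.le_iff_toList_le.mpr (by decide)) hc)
  have N5 : ¬ "ORN" ≤ p := fun hc => N1 (le_trans (String.le_iff_toList_le.mpr (by decide)) hc)
  have N6 : ¬ "OZA" ≤ p := fun hc => N1 (le_trans (String.le_iff_toList_le.mpr (by decide)) hc)
  have N7 : ¬ "PMA" ≤ p := fun hc => N1 (le_trans (String.le_iff_toList_le.mpr (by decide)) hc)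
  have N8 : ¬ "RIA" ≤ p := fun hc => N1 (le_trans (String.le_iff_toList_le.mpr (by decide)) hc)
  have N9 : ¬ "SAN" ≤ p := fun hc => N1 (le_trans (String.le_iff_toList_le.mpr (by decide)) hc)
  have hB : pvBSearch p 0 10 = 1 := by
    rw [pvB_step p 0 10 (by norm_num), show PySem.Int.floordiv (0 + 10) 2 = 5 from rfl, show PySem.List.pyGetD pvStarts 5 "" = "ORN" from rfl]
    rw [if_neg N5]
    rw [pvB_step p 0 5 (by norm_num), show PySem.Int.floordiv (0 + 5) 2 = 2 from rfl, show PySem.List.pyGetD pvStarts 2 "" = "NUM" from rfl]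
    rw [if_neg N2]
    rw [pvB_step p 0 2 (by norm_num), show PySem.Int.floordiv (0 + 2) 2 = 1 from rfl, show PySem.List.pyGetD pvStarts 1 "" = "NQL" from rfl]
    rw [if_neg N1]
    rw [pvB_step p 0 1 (by norm_num), show PySem.Int.floordiv (0 + 1) 2 = 0 from rfl, show PySem.List.pyGetD pvStarts 0 "" = "HTX" from rfl]
    rw [if_pos P0, show (0:Int) + 1 = 1 from rfl]
    exact pvB_base p 1
  simp [pvLoopA, pvIntervalos, pvAltCore, hB, P0, show PySem.List.pyGetD pvEnds 0 "" = "HZA" from rfl, N1, N2, N3, N4, N5, N6, N7, N8, N9]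

theorem pvLeaf2 (p : String) (P1 : "NQL" ≤ p) (N2 : ¬ "NUM" ≤ p) :
    pvLoopA p pvIntervalos = pvAltCore p := by
  have N3 : ¬ "OCB" ≤ p := fun hc => N2 (le_trans (String.le_iff_toList_le.mpr (by decide)) hc)
  have N4 : ¬ "OHX" ≤ p := fun hc => N2 (le_trans (String.le_iff_toList_le.mpr (by decide)) hc)
  have N5 : ¬ "ORN" ≤ p := fun hc => N2 (le_trans (String.le_iff_toList_le.mpr (by decide)) hc)
  have N6 : ¬ "OZA" ≤ p := fun hc => N2 (le_trans (String.le_iff_toList_le.mpr (by decide)) hc)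
  have N7 : ¬ "PMA" ≤ p := fun hc => N2 (le_trans (String.le_iff_toList_le.mpr (by decide)) hc)
  have N8 : ¬ "RIA" ≤ p := fun hc => N2 (le_trans (String.le_iff_toList_le.mpr (by decide)) hc)
  have N9 : ¬ "SAN" ≤ p := fun hc => N2 (le_trans (String.le_iff_toList_le.mpr (by decide)) hc)
  have hB : pvBSearch p 0 10 = 2 := by
    rw [pvB_step p 0 10 (by norm_num), show PySem.Int.floordiv (0 + 10) 2 = 5 from rfl, show PySem.List.pyGetD pvStarts 5 "" = "ORN" from rfl]
    rw [if_neg N5]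
    rw [pvB_step p 0 5 (by norm_num), show PySem.Int.floordiv (0 + 5) 2 = 2 from rfl, show PySem.List.pyGetD pvStarts 2 "" = "NUM" from rfl]
    rw [if_neg N2]
    rw [pvB_step p 0 2 (by norm_num), show PySem.Int.floordiv (0 + 2) 2 = 1 from rfl, show PySem.List.pyGetD pvStarts 1 "" = "NQL" from rfl]
    rw [if_pos P1, show (1:Int) + 1 = 2 from rfl]
    exact pvB_base p 2
  have n0 : ¬ p ≤ "HZA" := not_le.mpr (lt_of_lt_of_le (String.lt_iff_toList_lt.mpr (by decide)) P1)
  simp [pvLoopA, pvIntervalos, pvAltCore, hB, P1, show PySem.List.pyGetD pvEnds 1 "" = "NRE" from rfl, n0, N2, N3, N4, N5, N6, N7, N8, N9]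

theorem pvLeaf3 (p : String) (P2 : "NUM" ≤ p) (N3 : ¬ "OCB" ≤ p) :
    pvLoopA p pvIntervalos = pvAltCore p := by
  have N4 : ¬ "OHX" ≤ p := fun hc => N3 (le_trans (String.le_iff_toList_le.mpr (by decide)) hc)
  have N5 : ¬ "ORN" ≤ p := fun hc => N3 (le_trans (String.le_iff_toList_le.mpr (by decide)) hc)
  have N6 : ¬ "OZA" ≤ p := fun hc => N3 (le_trans (String.le_iff_toList_le.mpr (by decide)) hc)
  have N7 : ¬ "PMA" ≤ p := fun hc => N3 (le_trans (String.le_iff_toList_le.mpr (by decide)) hc)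
  have N8 : ¬ "RIA" ≤ p := fun hc => N3 (le_trans (String.le_iff_toList_le.mpr (by decide)) hc)
  have N9 : ¬ "SAN" ≤ p := fun hc => N3 (le_trans (String.le_iff_toList_le.mpr (by decide)) hc)
  have hB : pvBSearch p 0 10 = 3 := by
    rw [pvB_step p 0 10 (by norm_num), show PySem.Int.floordiv (0 + 10) 2 = 5 from rfl, show PySem.List.pyGetD pvStarts 5 "" = "ORN" from rfl]
    rw [if_neg N5]
    rw [pvB_step p 0 5 (by norm_num), show PySem.Int.floordiv (0 + 5) 2 = 2 from rfl, show PySem.List.pyGetD pvStarts 2 "" = "NUM" from rfl]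
    rw [if_pos P2, show (2:Int) + 1 = 3 from rfl]
    rw [pvB_step p 3 5 (by norm_num), show PySem.Int.floordiv (3 + 5) 2 = 4 from rfl, show PySem.List.pyGetD pvStarts 4 "" = "OHX" from rfl]
    rw [if_neg N4]
    rw [pvB_step p 3 4 (by norm_num), show PySem.Int.floordiv (3 + 4) 2 = 3 from rfl, show PySem.List.pyGetD pvStarts 3 "" = "OCB" from rfl]
    rw [if_neg N3]
    exact pvB_base p 3
  have n0 : ¬ p ≤ "HZA" := not_le.mpr (lt_of_lt_of_le (String.lt_iff_toList_lt.mpr (by decide)) P2)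
  have n1 : ¬ p ≤ "NRE" := not_le.mpr (lt_of_lt_of_le (String.lt_iff_toList_lt.mpr (by decide)) P2)
  simp [pvLoopA, pvIntervalos, pvAltCore, hB, P2, show PySem.List.pyGetD pvEnds 2 "" = "NVF" from rfl, n0, n1, N3, N4, N5, N6, N7, N8, N9]

theorem pvLeaf4 (p : String) (P3 : "OCB" ≤ p) (N4 : ¬ "OHX" ≤ p) :
    pvLoopA p pvIntervalos = pvAltCore p := by
  have P2 : "NUM" ≤ p := le_trans (String.le_iff_toList_le.mpr (by decide)) P3
  have N5 : ¬ "ORN" ≤ p := fun hc => N4 (le_trans (String.le_iff_toList_le.mpr (by decide)) hc)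
  have N6 : ¬ "OZA" ≤ p := fun hc => N4 (le_trans (String.le_iff_toList_le.mpr (by decide)) hc)
  have N7 : ¬ "PMA" ≤ p := fun hc => N4 (le_trans (String.le_iff_toList_le.mpr (by decide)) hc)
  have N8 : ¬ "RIA" ≤ p := fun hc => N4 (le_trans (String.le_iff_toList_le.mpr (by decide)) hc)
  have N9 : ¬ "SAN" ≤ p := fun hc => N4 (le_trans (String.le_iff_toList_le.mpr (by decide)) hc)
  have hB : pvBSearch p 0 10 = 4 := by
    rw [pvB_step p 0 10 (by norm_num), show PySem.Int.floordiv (0 + 10) 2 = 5 from rfl, show PySem.List.pyGetD pvStarts 5 "" = "ORN" from rfl]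
    rw [if_neg N5]
    rw [pvB_step p 0 5 (by norm_num), show PySem.Int.floordiv (0 + 5) 2 = 2 from rfl, show PySem.List.pyGetD pvStarts 2 "" = "NUM" from rfl]
    rw [if_pos P2, show (2:Int) + 1 = 3 from rfl]
    rw [pvB_step p 3 5 (by norm_num), show PySem.Int.floordiv (3 + 5) 2 = 4 from rfl, show PySem.List.pyGetD pvStarts 4 "" = "OHX" from rfl]
    rw [if_neg N4]
    rw [pvB_step p 3 4 (by norm_num), show PySem.Int.floordiv (3 + 4) 2 = 3 from rfl, show PySem.List.pyGetD pvStarts 3 "" = "OCB" from rfl]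
    rw [if_pos P3, show (3:Int) + 1 = 4 from rfl]
    exact pvB_base p 4
  have n0 : ¬ p ≤ "HZA" := not_le.mpr (lt_of_lt_of_le (String.lt_iff_toList_lt.mpr (by decide)) P3)
  have n1 : ¬ p ≤ "NRE" := not_le.mpr (lt_of_lt_of_le (String.lt_iff_toList_lt.mpr (by decide)) P3)
  have n2 : ¬ p ≤ "NVF" := not_le.mpr (lt_of_lt_of_le (String.lt_iff_toList_lt.mpr (by decide)) P3)
  simp [pvLoopA, pvIntervalos, pvAltCore, hB, P3, show PySem.List.pyGetD pvEnds 3 "" = "OCU" from rfl, n0, n1, n2, N4, N5, N6, N7, N8, N9]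

theorem pvLeaf5 (p : String) (P4 : "OHX" ≤ p) (N5 : ¬ "ORN" ≤ p) :
    pvLoopA p pvIntervalos = pvAltCore p := by
  have P2 : "NUM" ≤ p := le_trans (String.le_iff_toList_le.mpr (by decide)) P4
  have N6 : ¬ "OZA" ≤ p := fun hc => N5 (le_trans (String.le_iff_toList_le.mpr (by decide)) hc)
  have N7 : ¬ "PMA" ≤ p := fun hc => N5 (le_trans (String.le_iff_toList_le.mpr (by decide)) hc)
  have N8 : ¬ "RIA" ≤ p := fun hc => N5 (le_trans (String.le_iff_toList_le.mpr (by decide)) hc)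
  have N9 : ¬ "SAN" ≤ p := fun hc => N5 (le_trans (String.le_iff_toList_le.mpr (by decide)) hc)
  have hB : pvBSearch p 0 10 = 5 := by
    rw [pvB_step p 0 10 (by norm_num), show PySem.Int.floordiv (0 + 10) 2 = 5 from rfl, show PySem.List.pyGetD pvStarts 5 "" = "ORN" from rfl]
    rw [if_neg N5]
    rw [pvB_step p 0 5 (by norm_num), show PySem.Int.floordiv (0 + 5) 2 = 2 from rfl, show PySem.List.pyGetD pvStarts 2 "" = "NUM" from rfl]
    rw [if_pos P2, show (2:Int) + 1 = 3 from rfl]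
    rw [pvB_step p 3 5 (by norm_num), show PySem.Int.floordiv (3 + 5) 2 = 4 from rfl, show PySem.List.pyGetD pvStarts 4 "" = "OHX" from rfl]
    rw [if_pos P4, show (4:Int) + 1 = 5 from rfl]
    exact pvB_base p 5
  have n0 : ¬ p ≤ "HZA" := not_le.mpr (lt_of_lt_of_le (String.lt_iff_toList_lt.mpr (by decide)) P4)
  have n1 : ¬ p ≤ "NRE" := not_le.mpr (lt_of_lt_of_le (String.lt_iff_toList_lt.mpr (by decide)) P4)
  have n2 : ¬ p ≤ "NVF" := not_le.mpr (lt_of_lt_of_le (String.lt_iff_toList_lt.mpr (by decide)) P4)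
  have n3 : ¬ p ≤ "OCU" := not_le.mpr (lt_of_lt_of_le (String.lt_iff_toList_lt.mpr (by decide)) P4)
  simp [pvLoopA, pvIntervalos, pvAltCore, hB, P4, show PySem.List.pyGetD pvEnds 4 "" = "OIQ" from rfl, n0, n1, n2, n3, N5, N6, N7, N8, N9]

theorem pvLeaf6 (p : String) (P5 : "ORN" ≤ p) (N6 : ¬ "OZA" ≤ p) :
    pvLoopA p pvIntervalos = pvAltCore p := by
  have N7 : ¬ "PMA" ≤ p := fun hc => N6 (le_trans (String.le_iff_toList_le.mpr (by decide)) hc)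
  have N8 : ¬ "RIA" ≤ p := fun hc => N6 (le_trans (String.le_iff_toList_le.mpr (by decide)) hc)
  have N9 : ¬ "SAN" ≤ p := fun hc => N6 (le_trans (String.le_iff_toList_le.mpr (by decide)) hc)
  have hB : pvBSearch p 0 10 = 6 := by
    rw [pvB_step p 0 10 (by norm_num), show PySem.Int.floordiv (0 + 10) 2 = 5 from rfl, show PySem.List.pyGetD pvStarts 5 "" = "ORN" from rfl]
    rw [if_pos P5, show (5:Int) + 1 = 6 from rfl]
    rw [pvB_step p 6 10 (by norm_num), show PySem.Int.floordiv (6 + 10) 2 = 8 from rfl, show PySem.List.pyGetD pvStarts 8 "" = "RIA" from rfl]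
    rw [if_neg N8]
    rw [pvB_step p 6 8 (by norm_num), show PySem.Int.floordiv (6 + 8) 2 = 7 from rfl, show PySem.List.pyGetD pvStarts 7 "" = "PMA" from rfl]
    rw [if_neg N7]
    rw [pvB_step p 6 7 (by norm_num), show PySem.Int.floordiv (6 + 7) 2 = 6 from rfl, show PySem.List.pyGetD pvStarts 6 "" = "OZA" from rfl]
    rw [if_neg N6]
    exact pvB_base p 6
  have n0 : ¬ p ≤ "HZA" := not_le.mpr (lt_of_lt_of_le (String.lt_iff_toList_lt.mpr (by decide)) P5)
  have n1 : ¬ p ≤ "NRE" := not_le.mpr (lt_of_lt_of_le (String.lt_iff_toList_lt.mpr (by decide)) P5)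
  have n2 : ¬ p ≤ "NVF" := not_le.mpr (lt_of_lt_of_le (String.lt_iff_toList_lt.mpr (by decide)) P5)
  have n3 : ¬ p ≤ "OCU" := not_le.mpr (lt_of_lt_of_le (String.lt_iff_toList_lt.mpr (by decide)) P5)
  have n4 : ¬ p ≤ "OIQ" := not_le.mpr (lt_of_lt_of_le (String.lt_iff_toList_lt.mpr (by decide)) P5)
  simp [pvLoopA, pvIntervalos, pvAltCore, hB, P5, show PySem.List.pyGetD pvEnds 5 "" = "OSV" from rfl, n0, n1, n2, n3, n4, N6, N7, N8, N9]

theorem pvLeaf7 (p : String) (P6 : "OZA" ≤ p) (N7 : ¬ "PMA" ≤ p) :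
    pvLoopA p pvIntervalos = pvAltCore p := by
  have P5 : "ORN" ≤ p := le_trans (String.le_iff_toList_le.mpr (by decide)) P6
  have N8 : ¬ "RIA" ≤ p := fun hc => N7 (le_trans (String.le_iff_toList_le.mpr (by decide)) hc)
  have N9 : ¬ "SAN" ≤ p := fun hc => N7 (le_trans (String.le_iff_toList_le.mpr (by decide)) hc)
  have hB : pvBSearch p 0 10 = 7 := by
    rw [pvB_step p 0 10 (by norm_num), show PySem.Int.floordiv (0 + 10) 2 = 5 from rfl, show PySem.List.pyGetD pvStarts 5 "" = "ORN" from rfl]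
    rw [if_pos P5, show (5:Int) + 1 = 6 from rfl]
    rw [pvB_step p 6 10 (by norm_num), show PySem.Int.floordiv (6 + 10) 2 = 8 from rfl, show PySem.List.pyGetD pvStarts 8 "" = "RIA" from rfl]
    rw [if_neg N8]
    rw [pvB_step p 6 8 (by norm_num), show PySem.Int.floordiv (6 + 8) 2 = 7 from rfl, show PySem.List.pyGetD pvStarts 7 "" = "PMA" from rfl]
    rw [if_neg N7]
    rw [pvB_step p 6 7 (by norm_num), show PySem.Int.floordiv (6 + 7) 2 = 6 from rfl, show PySem.List.pyGetD pvStarts 6 "" = "OZA" from rfl]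
    rw [if_pos P6, show (6:Int) + 1 = 7 from rfl]
    exact pvB_base p 7
  have n0 : ¬ p ≤ "HZA" := not_le.mpr (lt_of_lt_of_le (String.lt_iff_toList_lt.mpr (by decide)) P6)
  have n1 : ¬ p ≤ "NRE" := not_le.mpr (lt_of_lt_of_le (String.lt_iff_toList_lt.mpr (by decide)) P6)
  have n2 : ¬ p ≤ "NVF" := not_le.mpr (lt_of_lt_of_le (String.lt_iff_toList_lt.mpr (by decide)) P6)
  have n3 : ¬ p ≤ "OCU" := not_le.mpr (lt_of_lt_of_le (String.lt_iff_toList_lt.mpr (by decide)) P6)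
  have n4 : ¬ p ≤ "OIQ" := not_le.mpr (lt_of_lt_of_le (String.lt_iff_toList_lt.mpr (by decide)) P6)
  have n5 : ¬ p ≤ "OSV" := not_le.mpr (lt_of_lt_of_le (String.lt_iff_toList_lt.mpr (by decide)) P6)
  simp [pvLoopA, pvIntervalos, pvAltCore, hB, P6, show PySem.List.pyGetD pvEnds 6 "" = "OZA" from rfl, n0, n1, n2, n3, n4, n5, N7, N8, N9]

theorem pvLeaf8 (p : String) (P7 : "PMA" ≤ p) (N8 : ¬ "RIA" ≤ p) :
    pvLoopA p pvIntervalos = pvAltCore p := by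
  have P5 : "ORN" ≤ p := le_trans (String.le_iff_toList_le.mpr (by decide)) P7
  have N9 : ¬ "SAN" ≤ p := fun hc => N8 (le_trans (String.le_iff_toList_le.mpr (by decide)) hc)
  have hB : pvBSearch p 0 10 = 8 := by
    rw [pvB_step p 0 10 (by norm_num), show PySem.Int.floordiv (0 + 10) 2 = 5 from rfl, show PySem.List.pyGetD pvStarts 5 "" = "ORN" from rfl]
    rw [if_pos P5, show (5:Int) + 1 = 6 from rfl]
    rw [pvB_step p 6 10 (by norm_num), show PySem.Int.floordiv (6 + 10) 2 = 8 from rfl, show PySem.List.pyGetD pvStarts 8 "" = "RIA" from rfl]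
    rw [if_neg N8]
    rw [pvB_step p 6 8 (by norm_num), show PySem.Int.floordiv (6 + 8) 2 = 7 from rfl, show PySem.List.pyGetD pvStarts 7 "" = "PMA" from rfl]
    rw [if_pos P7, show (7:Int) + 1 = 8 from rfl]
    exact pvB_base p 8
  have n0 : ¬ p ≤ "HZA" := not_le.mpr (lt_of_lt_of_le (String.lt_iff_toList_lt.mpr (by decide)) P7)
  have n1 : ¬ p ≤ "NRE" := not_le.mpr (lt_of_lt_of_le (String.lt_iff_toList_lt.mpr (by decide)) P7)
  have n2 : ¬ p ≤ "NVF" := not_le.mpr (lt_of_lt_of_le (String.lt_iff_toList_lt.mpr (by decide)) P7)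
  have n3 : ¬ p ≤ "OCU" := not_le.mpr (lt_of_lt_of_le (String.lt_iff_toList_lt.mpr (by decide)) P7)
  have n4 : ¬ p ≤ "OIQ" := not_le.mpr (lt_of_lt_of_le (String.lt_iff_toList_lt.mpr (by decide)) P7)
  have n5 : ¬ p ≤ "OSV" := not_le.mpr (lt_of_lt_of_le (String.lt_iff_toList_lt.mpr (by decide)) P7)
  have n6 : ¬ p ≤ "OZA" := not_le.mpr (lt_of_lt_of_le (String.lt_iff_toList_lt.mpr (by decide)) P7)
  simp [pvLoopA, pvIntervalos, pvAltCore, hB, P7, show PySem.List.pyGetD pvEnds 7 "" = "POZ" from rfl, n0, n1, n2, n3, n4, n5, n6, N8, N9]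

theorem pvLeaf9 (p : String) (P8 : "RIA" ≤ p) (N9 : ¬ "SAN" ≤ p) :
    pvLoopA p pvIntervalos = pvAltCore p := by
  have P5 : "ORN" ≤ p := le_trans (String.le_iff_toList_le.mpr (by decide)) P8
  have hB : pvBSearch p 0 10 = 9 := by
    rw [pvB_step p 0 10 (by norm_num), show PySem.Int.floordiv (0 + 10) 2 = 5 from rfl, show PySem.List.pyGetD pvStarts 5 "" = "ORN" from rfl]
    rw [if_pos P5, show (5:Int) + 1 = 6 from rfl]
    rw [pvB_step p 6 10 (by norm_num), show PySem.Int.floordiv (6 + 10) 2 = 8 from rfl, show PySem.List.pyGetD pvStarts 8 "" = "RIA" from rfl]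
    rw [if_pos P8, show (8:Int) + 1 = 9 from rfl]
    rw [pvB_step p 9 10 (by norm_num), show PySem.Int.floordiv (9 + 10) 2 = 9 from rfl, show PySem.List.pyGetD pvStarts 9 "" = "SAN" from rfl]
    rw [if_neg N9]
    exact pvB_base p 9
  have n0 : ¬ p ≤ "HZA" := not_le.mpr (lt_of_lt_of_le (String.lt_iff_toList_lt.mpr (by decide)) P8)
  have n1 : ¬ p ≤ "NRE" := not_le.mpr (lt_of_lt_of_le (String.lt_iff_toList_lt.mpr (by decide)) P8)
  have n2 : ¬ p ≤ "NVF" := not_le.mpr (lt_of_lt_of_le (String.lt_iff_toList_lt.mpr (by decide)) P8)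
  have n3 : ¬ p ≤ "OCU" := not_le.mpr (lt_of_lt_of_le (String.lt_iff_toList_lt.mpr (by decide)) P8)
  have n4 : ¬ p ≤ "OIQ" := not_le.mpr (lt_of_lt_of_le (String.lt_iff_toList_lt.mpr (by decide)) P8)
  have n5 : ¬ p ≤ "OSV" := not_le.mpr (lt_of_lt_of_le (String.lt_iff_toList_lt.mpr (by decide)) P8)
  have n6 : ¬ p ≤ "OZA" := not_le.mpr (lt_of_lt_of_le (String.lt_iff_toList_lt.mpr (by decide)) P8)
  have n7 : ¬ p ≤ "POZ" := not_le.mpr (lt_of_lt_of_le (String.lt_iff_toList_lt.mpr (by decide)) P8)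
  simp [pvLoopA, pvIntervalos, pvAltCore, hB, P8, show PySem.List.pyGetD pvEnds 8 "" = "RIN" from rfl, n0, n1, n2, n3, n4, n5, n6, n7, N9]

theorem pvLeaf10 (p : String) (P9 : "SAN" ≤ p) :
    pvLoopA p pvIntervalos = pvAltCore p := by
  have P5 : "ORN" ≤ p := le_trans (String.le_iff_toList_le.mpr (by decide)) P9
  have P8 : "RIA" ≤ p := le_trans (String.le_iff_toList_le.mpr (by decide)) P9
  have hB : pvBSearch p 0 10 = 10 := by
    rw [pvB_step p 0 10 (by norm_num), show PySem.Int.floordiv (0 + 10) 2 = 5 from rfl, show PySem.List.pyGetD pvStarts 5 "" = "ORN" from rfl]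
    rw [if_pos P5, show (5:Int) + 1 = 6 from rfl]
    rw [pvB_step p 6 10 (by norm_num), show PySem.Int.floordiv (6 + 10) 2 = 8 from rfl, show PySem.List.pyGetD pvStarts 8 "" = "RIA" from rfl]
    rw [if_pos P8, show (8:Int) + 1 = 9 from rfl]
    rw [pvB_step p 9 10 (by norm_num), show PySem.Int.floordiv (9 + 10) 2 = 9 from rfl, show PySem.List.pyGetD pvStarts 9 "" = "SAN" from rfl]
    rw [if_pos P9, show (9:Int) + 1 = 10 from rfl]
    exact pvB_base p 10
  have n0 : ¬ p ≤ "HZA" := not_le.mpr (lt_of_lt_of_le (String.lt_iff_toList_lt.mpr (by decide)) P9)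
  have n1 : ¬ p ≤ "NRE" := not_le.mpr (lt_of_lt_of_le (String.lt_iff_toList_lt.mpr (by decide)) P9)
  have n2 : ¬ p ≤ "NVF" := not_le.mpr (lt_of_lt_of_le (String.lt_iff_toList_lt.mpr (by decide)) P9)
  have n3 : ¬ p ≤ "OCU" := not_le.mpr (lt_of_lt_of_le (String.lt_iff_toList_lt.mpr (by decide)) P9)
  have n4 : ¬ p ≤ "OIQ" := not_le.mpr (lt_of_lt_of_le (String.lt_iff_toList_lt.mpr (by decide)) P9)
  have n5 : ¬ p ≤ "OSV" := not_le.mpr (lt_of_lt_of_le (String.lt_iff_toList_lt.mpr (by decide)) P9)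
  have n6 : ¬ p ≤ "OZA" := not_le.mpr (lt_of_lt_of_le (String.lt_iff_toList_lt.mpr (by decide)) P9)
  have n7 : ¬ p ≤ "POZ" := not_le.mpr (lt_of_lt_of_le (String.lt_iff_toList_lt.mpr (by decide)) P9)
  have n8 : ¬ p ≤ "RIN" := not_le.mpr (lt_of_lt_of_le (String.lt_iff_toList_lt.mpr (by decide)) P9)
  simp [pvLoopA, pvIntervalos, pvAltCore, hB, P9, show PySem.List.pyGetD pvEnds 9 "" = "SBV" from rfl, n0, n1, n2, n3, n4, n5, n6, n7, n8]

-- the case split over the 11 landing positions of the binary search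
theorem pvMain (p : String) : pvLoopA p pvIntervalos = pvAltCore p := by
  by_cases h5 : "ORN" ≤ p
  · by_cases h8 : "RIA" ≤ p
    · by_cases h9 : "SAN" ≤ p
      · exact pvLeaf10 p h9
      · exact pvLeaf9 p h8 h9
    · by_cases h7 : "PMA" ≤ p
      · exact pvLeaf8 p h7 h8
      · by_cases h6 : "OZA" ≤ p
        · exact pvLeaf7 p h6 h7
        · exact pvLeaf6 p h5 h6
  · by_cases h2 : "NUM" ≤ p
    · by_cases h4 : "OHX" ≤ p
      · exact pvLeaf5 p h4 h5
      · by_cases h3 : "OCB" ≤ p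
        · exact pvLeaf4 p h3 h4
        · exact pvLeaf3 p h2 h3
    · by_cases h1 : "NQL" ≤ p
      · exact pvLeaf2 p h1 h2
      · by_cases h0 : "HTX" ≤ p
        · exact pvLeaf1 p h0 h1
        · exact pvLeaf0 p h0

-- ===== VERDICT (by name: the statement is the Claim_ definition above) =====
theorem verificaCeara_spec : Claim_equal_verificaCeara := by
  intro placa _
  unfold Spec_verificaCeara verificaCeara verificaCeara_alt
  exact pvMain (PySem.Str.slice placa none (some 3))
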